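-- pv_equiv track=rewrite | github.com/Bastion-Workspace/bastion | backend/services/link_extraction_service.py | _normalize_path_segments
-- ===== SOURCE A (Python) =====
-- from typing import List, Dict, Any, Optional, Tuple
--
-- def _normalize_path_segments(raw_path: str) -> Tuple[List[str], str]:
--     """Normalize relative path to list of folder segments and filename. Returns (segment_list, filename)."""
--     raw = raw_path.replace('\\', '/').strip()
--     parts = [p for p in raw.split('/') if p and p != '.']
--     if not parts:
--         return [], ''
--     # Resolve ..
--     resolved = []
--     for p in parts:
--         if p == '..':
--             if resolved:
--                 resolved.pop()
--             continue
--         resolved.append(p)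
--     if not resolved:
--         return [], ''
--     filename = resolved[-1]
--     folder_segments = resolved[:-1]
--     return folder_segments, filename
-- ===== SOURCE B (Python) =====
-- from typing import List, Tuple
--
-- def _normalize_path_segments(raw_path: str) -> Tuple[List[str], str]:
--     """Normalize relative path to (folder segments, filename) by a single
--     reverse scan with a '..' skip counter instead of a forward pop-stack."""
--     parts = [p for p in raw_path.replace('\\', '/').strip().split('/')
--              if p not in ('', '.')]
--     resolved = []
--     skip = 0
--     for p in reversed(parts):
--         if p == '..':
--             skip += 1
--         elif skip:
--             skip -= 1
--         else:
--             resolved.insert(0, p)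
--     if not resolved:
--         return [], ''
--     return resolved[:-1], resolved[-1]
-- ===== Notes on version B (the rewrite author's own statement) =====
-- stated objective: alternative
-- what changed: Replaces the forward push/pop stack that resolves parent-directory markers by a single reverse scan maintaining an integer skip counter that prepends kept segments and discards leftover skips, so the empty-parts early return disappears.
import Mathlib
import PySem

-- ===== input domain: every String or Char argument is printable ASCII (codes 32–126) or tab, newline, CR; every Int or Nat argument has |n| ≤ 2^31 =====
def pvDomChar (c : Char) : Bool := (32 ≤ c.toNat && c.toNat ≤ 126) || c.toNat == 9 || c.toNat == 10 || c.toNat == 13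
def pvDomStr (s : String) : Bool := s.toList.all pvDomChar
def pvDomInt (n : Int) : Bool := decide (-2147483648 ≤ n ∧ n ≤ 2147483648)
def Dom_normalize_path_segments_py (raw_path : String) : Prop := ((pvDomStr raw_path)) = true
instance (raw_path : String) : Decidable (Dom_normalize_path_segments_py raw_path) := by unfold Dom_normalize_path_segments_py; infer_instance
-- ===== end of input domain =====

-- B resolves '..' by a reverse scan with a skip counter instead of A's forward pop-stack; same result, alternative algorithm (return value only; neither mutates inputs).

-- ===== PORT A =====
-- forward loop over parts: '..' pops the stack (if nonempty), else push
def pvResolveA (resolved : List String) : List String → List String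
  | [] => resolved
  | p :: rest =>
    if p = ".." then
      pvResolveA (if resolved = [] then resolved else resolved.dropLast) rest
    else
      pvResolveA (resolved ++ [p]) rest

def normalize_path_segments_py (raw_path : String) : List String × String :=
  -- "/" is a nonempty literal separator, so split? is always `some`; .getD [] is exact here
  let raw := PySem.Str.strip (PySem.Str.replace raw_path "\\" "/")
  let parts := ((PySem.Str.split? raw "/").getD []).filter (fun p => decide (p ≠ "") && decide (p ≠ "."))
  if parts = [] then ([], "")
  else
    let resolved := pvResolveA [] parts
    if resolved = [] then ([], "")
    else (PySem.List.slice resolved none (some (-1)), PySem.List.pyGetD resolved (-1) "")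

-- ===== PORT B =====
-- reverse scan: '..' increments skip, a pending skip drops the segment, else prepend
def pvResolveB (rev : List String) (skip : Nat) (acc : List String) : List String :=
  match rev with
  | [] => acc
  | p :: rest =>
    if p = ".." then pvResolveB rest (skip + 1) acc
    else if 0 < skip then pvResolveB rest (skip - 1) acc
    else pvResolveB rest skip (p :: acc)

def normalize_path_segments_py_alt (raw_path : String) : List String × String :=
  let parts := ((PySem.Str.split? (PySem.Str.strip (PySem.Str.replace raw_path "\\" "/")) "/").getD []).filter
      (fun p => decide (p ∉ (["", "."] : List String)))
  let resolved := pvResolveB parts.reverse 0 []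
  if resolved = [] then ([], "")
  else (PySem.List.slice resolved none (some (-1)), PySem.List.pyGetD resolved (-1) "")

-- ===== PRECONDITION & SPEC =====
def Spec_normalize_path_segments_py (raw_path : String) (out : List String × String) : Prop := out = normalize_path_segments_py_alt raw_path
instance (raw_path : String) (out : List String × String) : Decidable (Spec_normalize_path_segments_py raw_path out) := by unfold Spec_normalize_path_segments_py; infer_instance

-- ===== CLAIM (what is proved, stated in full; the proofs are below) =====
def Claim_equal_normalize_path_segments_py : Prop := ∀ (raw_path : String), Dom_normalize_path_segments_py raw_path → Spec_normalize_path_segments_py raw_path (normalize_path_segments_py raw_path)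

-- ===== LEMMAS AND PROOFS =====

lemma pvResolveA_append (resolved : List String) (l : List String) (p : String) :
    pvResolveA resolved (l ++ [p]) =
      (if p = ".." then
        (if pvResolveA resolved l = [] then pvResolveA resolved l else (pvResolveA resolved l).dropLast)
      else pvResolveA resolved l ++ [p]) := by
  induction l generalizing resolved with
  | nil => simp [pvResolveA]
  | cons q rest ih =>
    simp only [List.cons_append, pvResolveA]
    by_cases hq : q = ".." <;> simp [hq, ih]

lemma pvResolveA_step (resolved : List String) :
    (if resolved = [] then resolved else resolved.dropLast) = resolved.dropLast := by
  by_cases h : resolved = [] <;> simp [h]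

-- key invariant: the reverse skip-counter scan equals A's stack result minus its last `skip` elements
lemma pvResolveB_eq (l : List String) (skip : Nat) (acc : List String) :
    pvResolveB l.reverse skip acc =
      (pvResolveA [] l).take ((pvResolveA [] l).length - skip) ++ acc := by
  induction l using List.reverseRecOn generalizing skip acc with
  | nil => simp [pvResolveB, pvResolveA]
  | append_singleton l p ih =>
    rw [List.reverse_append]
    simp only [List.reverse_singleton, List.singleton_append, pvResolveB, pvResolveA_append]
    by_cases hp : p = ".."
    · rw [if_pos hp, if_pos hp, pvResolveA_step, ih]
      rw [List.dropLast_eq_take, List.take_take]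
      congr 2
      simp
      omega
    · rw [if_neg hp, if_neg hp]
      rcases Nat.eq_zero_or_pos skip with hs | hs
      · subst hs
        rw [if_neg (by omega), ih]
        simp [List.take_append]
      · rw [if_pos hs, ih, List.take_append]
        have h1 : (pvResolveA [] l).length + 1 - skip = (pvResolveA [] l).length - (skip - 1) := by omega
        simp [h1]

lemma pvResolveB_zero (l : List String) :
    pvResolveB l.reverse 0 [] = pvResolveA [] l := by
  rw [pvResolveB_eq]; simp

-- ===== VERDICT (by name: the statement is the Claim_ definition above) =====
theorem normalize_path_segments_py_spec : Claim_equal_normalize_path_segments_py := by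
  intro raw_path _
  unfold Spec_normalize_path_segments_py
  have hfilter : (fun p => decide (p ∉ (["", "."] : List String)))
      = (fun (p : String) => decide (p ≠ "") && decide (p ≠ ".")) := by
    funext p
    by_cases h1 : p = "" <;> by_cases h2 : p = "." <;> simp [h1, h2]
  simp only [normalize_path_segments_py, normalize_path_segments_py_alt, hfilter, pvResolveB_zero]
  generalize (((PySem.Str.split? (PySem.Str.strip (PySem.Str.replace raw_path "\\" "/")) "/").getD []).filter
      (fun (p : String) => decide (p ≠ "") && decide (p ≠ "."))) = parts
  by_cases hp : parts = []
  · subst hp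
    simp [pvResolveA]
  · rw [if_neg hp]
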